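-- pv_equiv track=rewrite | github.com/nikcholer/cryptic-solver | cryptic_skills/anagram.py | filter_by_pattern
-- ===== SOURCE A (Python) =====
-- from typing import Any, Dict, List, Optional
--
-- def filter_by_pattern(words: List[str], pattern: Optional[str]) -> List[str]:
--     """Filters a list of words by a given pattern (e.g. 'P...S....')."""
--     if not pattern:
--         return words
--
--     pattern = pattern.lower()
--     filtered = []
--     for word in words:
--         if len(word) != len(pattern):
--             continue
--
--         match = True
--         for w_char, p_char in zip(word, pattern):
--             if p_char != '.' and w_char != p_char:
--                 match = False
--                 break
--
--         if match:
--             filtered.append(word)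
--
--     return filtered
-- ===== SOURCE B (Python) =====
-- def _matches(word, pat):
--     """Recursive matcher: consumes word and pattern in lockstep."""
--     if not pat:
--         return not word
--     if not word:
--         return False
--     return (pat[0] == '.' or word[0] == pat[0]) and _matches(word[1:], pat[1:])
--
-- def filter_by_pattern(words, pattern):
--     """Filters a list of words by a given pattern (e.g. 'P...S....')."""
--     if not pattern:
--         return words
--     pl = pattern.lower()
--     return [w for w in words if _matches(w, pl)]
-- ===== Notes on version B (the rewrite author's own statement) =====
-- stated objective: simpler
-- what changed: A's explicit length check plus zip loop with a match flag and break is replaced by a recursive two-pointer matcher that consumes word and pattern together (length mismatch falls out of the recursion) and a list comprehension.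
import Mathlib
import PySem

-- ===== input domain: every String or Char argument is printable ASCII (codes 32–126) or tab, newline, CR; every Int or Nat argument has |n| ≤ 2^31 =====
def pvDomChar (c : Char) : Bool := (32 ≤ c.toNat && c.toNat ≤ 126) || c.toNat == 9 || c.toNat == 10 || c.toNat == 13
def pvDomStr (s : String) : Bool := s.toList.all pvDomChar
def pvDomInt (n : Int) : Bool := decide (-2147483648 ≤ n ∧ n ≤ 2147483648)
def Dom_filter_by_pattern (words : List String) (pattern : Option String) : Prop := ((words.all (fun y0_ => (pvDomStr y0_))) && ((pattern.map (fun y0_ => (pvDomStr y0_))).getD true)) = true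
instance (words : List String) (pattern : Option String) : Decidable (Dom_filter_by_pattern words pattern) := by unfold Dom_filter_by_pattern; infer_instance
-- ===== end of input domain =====

-- B replaces A's length check + zip loop with flag/break by a recursive lockstep matcher and a comprehension (simpler; same cost).

-- ===== PORT A =====
-- inner 'for w_char, p_char in zip(word, pattern): …' loop with break
def aMatchLoop : List (Char × Char) → Bool
  | [] => true
  | (wc, pc) :: rest => if pc ≠ '.' ∧ wc ≠ pc then false else aMatchLoop rest

def filter_by_pattern (words : List String) (pattern : Option String) : List String :=
  match pattern with
  | none => words
  | some pat =>
    if pat.toList = [] then words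
    else
      let p := PySem.Str.lower pat
      words.foldl (fun filtered word =>
        if word.toList.length ≠ p.toList.length then filtered
        else if aMatchLoop (word.toList.zip p.toList) then filtered ++ [word]
        else filtered) []

-- ===== PORT B =====
-- recursive _matches(word, pat)
def bMatches : List Char → List Char → Bool
  | w, [] => w.isEmpty
  | [], _ :: _ => false
  | wc :: wrest, pc :: prest => (pc == '.' || wc == pc) && bMatches wrest prest

def filter_by_pattern_alt (words : List String) (pattern : Option String) : List String :=
  match pattern with
  | none => words
  | some pat =>
    if pat.toList = [] then words
    else
      let pl := PySem.Str.lower pat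
      words.filter (fun w => bMatches w.toList pl.toList)

-- ===== PRECONDITION & SPEC =====
def Spec_filter_by_pattern (words : List String) (pattern : Option String) (out : List String) : Prop := out = filter_by_pattern_alt words pattern
instance (words : List String) (pattern : Option String) (out : List String) : Decidable (Spec_filter_by_pattern words pattern out) := by unfold Spec_filter_by_pattern; infer_instance

-- ===== CLAIM (what is proved, stated in full; the proofs are below) =====
def Claim_equal_filter_by_pattern : Prop := ∀ (words : List String) (pattern : Option String), Dom_filter_by_pattern words pattern → Spec_filter_by_pattern words pattern (filter_by_pattern words pattern)

-- ===== LEMMAS AND PROOFS =====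

-- B's recursive matcher = A's length check plus zip loop.
theorem bMatches_eq (p w : List Char) :
    bMatches w p = (decide (w.length = p.length) && aMatchLoop (w.zip p)) := by
  induction p generalizing w with
  | nil => cases w <;> simp [bMatches, aMatchLoop, List.isEmpty]
  | cons pc prest ih =>
    cases w with
    | nil => simp [bMatches]
    | cons wc wrest =>
      simp only [bMatches, aMatchLoop, List.zip_cons_cons, List.length_cons, ih]
      by_cases hp : pc = '.'
      · simp [hp]
      · by_cases hw : wc = pc
        · simp [hp, hw]
        · simp [hp, hw, Ne.symm]

-- A's accumulator loop (skip on length mismatch, append on match) is a filter.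
theorem foldl_skip_filter (c1 : String → Prop) [DecidablePred c1] (c2 : String → Bool) (words acc : List String) :
    words.foldl (fun filtered word =>
        if c1 word then filtered
        else if c2 word then filtered ++ [word]
        else filtered) acc
      = acc ++ words.filter (fun w => !decide (c1 w) && c2 w) := by
  induction words generalizing acc with
  | nil => simp
  | cons w ws ih =>
    by_cases h1 : c1 w
    · simp [List.foldl, h1, ih]
    · by_cases h2 : c2 w <;> simp [List.foldl, h1, h2, ih]

-- ===== VERDICT (by name: the statement is the Claim_ definition above) =====
theorem filter_by_pattern_spec : Claim_equal_filter_by_pattern := by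
  intro words pattern _
  unfold Spec_filter_by_pattern filter_by_pattern filter_by_pattern_alt
  cases pattern with
  | none => rfl
  | some pat =>
    simp only
    by_cases hp : pat.toList = []
    · simp [hp]
    · simp only [hp, if_false]
      rw [foldl_skip_filter
            (fun word => word.toList.length ≠ (PySem.Str.lower pat).toList.length)
            (fun word => aMatchLoop (word.toList.zip (PySem.Str.lower pat).toList)) words []]
      simp only [List.nil_append]
      apply List.filter_congr
      intro w _
      rw [bMatches_eq]
      by_cases hl : w.toList.length = (PySem.Str.lower pat).toList.length <;> simp [hl]
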